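-- pv_equiv track=rewrite | github.com/kgw012/TIL | 0824/algorithm/swea/tournament_card_game.py | dfs
-- ===== SOURCE A (Python) =====
-- def rsp(lst, a, b):
--     if lst[a] == 1:
--         if lst[b] == 1:
--             return a
--         elif lst[b] == 2:
--             return b
--         else:
--             return a
--     elif lst[a] == 2:
--         if lst[b] == 1:
--             return a
--         elif lst[b] == 2:
--             return a
--         else:
--             return b
--     else:
--         if lst[b] == 1:
--             return b
--         elif lst[b] == 2:
--             return a
--         else:
--             return a
--
-- def dfs(lst, st, fn):
--     if fn == st:
--         return st
--
--     if fn - st == 1: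
--         winner = rsp(lst, st, fn)
--         return winner
--
--     md = (st + fn) // 2
--     winner1 = dfs(lst, st, md)
--     winner2 = dfs(lst, md + 1, fn)
--
--     return rsp(lst, winner1, winner2)
-- ===== SOURCE B (Python) =====
-- def rsp(lst, a, b):
--     if lst[a] == 1:
--         if lst[b] == 1:
--             return a
--         elif lst[b] == 2:
--             return b
--         else:
--             return a
--     elif lst[a] == 2:
--         if lst[b] == 1:
--             return a
--         elif lst[b] == 2:
--             return a
--         else:
--             return b
--     else:
--         if lst[b] == 1:
--             return b
--         elif lst[b] == 2:
--             return a
--         else: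
--             return a
--
-- def dfs(lst, st, fn):
--     # iterative post-order tournament: an explicit stack of bracket ranges
--     # (a range is re-pushed with ready=True once its halves are scheduled)
--     stack = [(st, fn, False)]
--     results = []
--     while stack:
--         s, f, ready = stack.pop()
--         if f == s:
--             results.append(s)
--         elif f - s == 1:
--             results.append(rsp(lst, s, f))
--         elif ready:
--             w2 = results.pop()
--             w1 = results.pop()
--             results.append(rsp(lst, w1, w2))
--         else:
--             md = (s + f) // 2
--             stack.append((s, f, True))
--             stack.append((md + 1, f, False))
--             stack.append((s, md, False))
--     return results[-1]
-- ===== Notes on version B (the rewrite author's own statement) =====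
-- stated objective: alternative
-- what changed: The recursive divide-and-conquer is replaced by an iterative post-order traversal: an explicit stack of bracket ranges with a ready flag plus a results stack combines the two half-winners with rsp, instead of Python recursion.
import Mathlib
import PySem

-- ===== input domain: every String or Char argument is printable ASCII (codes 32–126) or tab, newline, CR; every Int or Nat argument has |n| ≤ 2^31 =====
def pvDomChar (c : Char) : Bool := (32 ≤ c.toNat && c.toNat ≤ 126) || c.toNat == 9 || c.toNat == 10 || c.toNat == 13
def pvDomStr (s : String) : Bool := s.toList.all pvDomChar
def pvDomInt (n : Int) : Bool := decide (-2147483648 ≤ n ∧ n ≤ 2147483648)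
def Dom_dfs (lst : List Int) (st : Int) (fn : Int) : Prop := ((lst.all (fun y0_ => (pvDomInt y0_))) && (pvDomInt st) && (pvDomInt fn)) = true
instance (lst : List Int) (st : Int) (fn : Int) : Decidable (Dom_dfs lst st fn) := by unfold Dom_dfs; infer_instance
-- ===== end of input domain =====

-- B replaces A's recursion by an explicit-stack iterative post-order traversal of the same bracket (alternative decomposition, same cost).

-- ===== PORT A =====
-- shared helper rsp: identical in Source A and Source B, ported once.
-- lst[a] is ported as (pyGet? lst a).getD 0: exact whenever the index is in
-- range (Python raises IndexError otherwise; Pre_dfs excludes those inputs).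
def rsp (lst : List Int) (a b : Int) : Int :=
  let va := (PySem.List.pyGet? lst a).getD 0
  let vb := (PySem.List.pyGet? lst b).getD 0
  if va = 1 then
    (if vb = 1 then a else if vb = 2 then b else a)
  else if va = 2 then
    (if vb = 1 then a else if vb = 2 then a else b)
  else
    (if vb = 1 then b else if vb = 2 then a else a)

-- A's recursion, fuel-bounded to make it total (Python diverges when fn < st;
-- Pre_dfs guarantees the fuel below suffices, so on Pre_ this is A step for step).
def dfsF (lst : List Int) : Nat → Int → Int → Int
  | 0, _, _ => 0
  | fuel + 1, st, fn =>
    if fn = st then st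
    else if fn - st = 1 then rsp lst st fn
    else
      let md := PySem.Int.floordiv (st + fn) 2
      let w1 := dfsF lst fuel st md
      let w2 := dfsF lst fuel (md + 1) fn
      rsp lst w1 w2

def dfs (lst : List Int) (st : Int) (fn : Int) : Int :=
  dfsF lst ((fn - st).toNat + 1) st fn

-- ===== PORT B =====
-- the while loop over the explicit stack; the results stack is kept head-first
-- (append = cons, pop = head, results[-1] = pyGet? (-1) of the reversed list is
-- taken on the final list below). Fuel bounds the iteration count (Python's loop
-- runs forever when fn < st; Pre_dfs guarantees the fuel suffices).
def loopB (lst : List Int) : Nat → List (Int × Int × Bool) → List Int → List Int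
  | _, [], res => res
  | 0, _ :: _, res => res
  | fuel + 1, (s, f, ready) :: stack, res =>
    if f = s then loopB lst fuel stack (s :: res)
    else if f - s = 1 then loopB lst fuel stack (rsp lst s f :: res)
    else if ready then
      match res with
      | w2 :: w1 :: rest => loopB lst fuel stack (rsp lst w1 w2 :: rest)
      | _ => res   -- unreachable: every ready frame has its two winners on res
    else
      let md := PySem.Int.floordiv (s + f) 2
      loopB lst fuel ((s, md, false) :: (md + 1, f, false) :: (s, f, true) :: stack) res

def dfs_alt (lst : List Int) (st : Int) (fn : Int) : Int :=
  -- results are newest-first, so Python's results[-1] is the head = index 0 of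
  -- the Lean list; equivalently pyGet? res (-1) on the reversed list — we read
  -- the head directly since the list is stored reversed.
  let res := loopB lst (4 * (fn - st).toNat + 2) [(st, fn, false)] []
  (res.head?).getD 0

-- ===== PRECONDITION & SPEC =====
-- Pre_dfs is exactly where Python's dfs returns: fn < st recurses forever
-- (RecursionError) and, when st < fn, every index of [st, fn] is looked up, so
-- the range must lie inside Python's valid (possibly negative) index range.
def Pre_dfs (lst : List Int) (st : Int) (fn : Int) : Prop :=
  st ≤ fn ∧ (st = fn ∨ (-(lst.length : Int) ≤ st ∧ fn < lst.length))
instance (lst : List Int) (st : Int) (fn : Int) : Decidable (Pre_dfs lst st fn) := by unfold Pre_dfs; infer_instance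
def pvWitness_dfs : List Int × Int × Int := ([1, 2, 3, 2, 1], 0, 4)

def Spec_dfs (lst : List Int) (st : Int) (fn : Int) (out : Int) : Prop := out = dfs_alt lst st fn
instance (lst : List Int) (st : Int) (fn : Int) (out : Int) : Decidable (Spec_dfs lst st fn out) := by unfold Spec_dfs; infer_instance

-- ===== CLAIM (what is proved, stated in full; the proofs are below) =====
def Claim_equal_dfs : Prop := ∀ (lst : List Int) (st : Int) (fn : Int), Dom_dfs lst st fn → Pre_dfs lst st fn → Spec_dfs lst st fn (dfs lst st fn)

-- ===== LEMMAS AND PROOFS =====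

-- midpoint bounds for the strict split case
lemma mid_bounds (s f : Int) (h : s + 2 ≤ f) :
    s + 1 ≤ PySem.Int.floordiv (s + f) 2 ∧ PySem.Int.floordiv (s + f) 2 ≤ f - 1 := by
  have h0 := PySem.Int.floordiv_mul_add_mod (s + f) 2
  have h1 := PySem.Int.mod_nonneg (s + f) (b := 2) (by omega)
  have h2 := PySem.Int.mod_lt (s + f) (b := 2) (by omega)
  omega

-- dfsF does not depend on the fuel once the fuel exceeds the range length
lemma dfsF_mono (lst : List Int) (s f : Int) (h : s ≤ f) :
    ∀ fuel1 fuel2, (f - s).toNat < fuel1 → (f - s).toNat < fuel2 →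
      dfsF lst fuel1 s f = dfsF lst fuel2 s f := by
  intro fuel1 fuel2 h1 h2
  match fuel1, fuel2 with
  | a + 1, b + 1 =>
    simp only [dfsF]
    by_cases hfs : f = s
    · simp [hfs]
    · by_cases hfs1 : f - s = 1
      · simp [hfs, hfs1]
      · have hsplit : s + 2 ≤ f := by omega
        obtain ⟨hm1, hm2⟩ := mid_bounds s f hsplit
        set md := PySem.Int.floordiv (s + f) 2 with hmd
        have eL := dfsF_mono lst s md (by omega) a b (by omega) (by omega)
        have eR := dfsF_mono lst (md + 1) f (by omega) a b (by omega) (by omega)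
        simp [hfs, hfs1, eL, eR]
termination_by (f - s).toNat
decreasing_by
  · omega
  · omega

-- running the loop on a scheduled range pops it after some k ≤ 4n+1 steps,
-- leaving that range's tournament winner on top of the results stack
lemma loopB_run (lst : List Int) (s f : Int) (h : s ≤ f) :
    ∃ k, k ≤ 4 * (f - s).toNat + 1 ∧
      ∀ (m : Nat) (stack : List (Int × Int × Bool)) (res : List Int),
        loopB lst (k + m) ((s, f, false) :: stack) res
          = loopB lst m stack (dfsF lst ((f - s).toNat + 1) s f :: res) := by
  by_cases hfs : f = s
  · subst hfs
    refine ⟨1, by omega, ?_⟩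
    intro m stack res
    rw [Nat.add_comm 1 m]
    simp [loopB, dfsF]
  · by_cases hfs1 : f - s = 1
    · refine ⟨1, by omega, ?_⟩
      intro m stack res
      rw [Nat.add_comm 1 m]
      simp only [loopB, dfsF]
      rw [if_neg hfs, if_pos hfs1, if_neg hfs, if_pos hfs1]
    · have hsplit : s + 2 ≤ f := by omega
      obtain ⟨hm1, hm2⟩ := mid_bounds s f hsplit
      set md := PySem.Int.floordiv (s + f) 2 with hmd
      obtain ⟨kL, hkL, eL⟩ := loopB_run lst s md (by omega)
      obtain ⟨kR, hkR, eR⟩ := loopB_run lst (md + 1) f (by omega)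
      refine ⟨1 + kL + kR + 1, by omega, ?_⟩
      intro m stack res
      have step1 : loopB lst (1 + kL + kR + 1 + m) ((s, f, false) :: stack) res
          = loopB lst (kL + (kR + (1 + m)))
              ((s, md, false) :: (md + 1, f, false) :: (s, f, true) :: stack) res := by
        rw [show 1 + kL + kR + 1 + m = (kL + (kR + (1 + m))) + 1 by omega]
        simp only [loopB, ← hmd]
        rw [if_neg hfs, if_neg hfs1]
        simp
      rw [step1, eL, eR]
      have step2 : loopB lst (1 + m) ((s, f, true) :: stack)
            (dfsF lst ((f - (md + 1)).toNat + 1) (md + 1) f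
              :: dfsF lst ((md - s).toNat + 1) s md :: res)
          = loopB lst m stack
              (rsp lst (dfsF lst ((md - s).toNat + 1) s md)
                (dfsF lst ((f - (md + 1)).toNat + 1) (md + 1) f) :: res) := by
        rw [Nat.add_comm 1 m]
        simp only [loopB]
        rw [if_neg hfs, if_neg hfs1]
        simp
      rw [step2]
      -- identify with one unfolding of dfsF at fuel (f-s).toNat + 1
      congr 1
      congr 1
      rw [show (f - s).toNat + 1 = ((f - s).toNat - 1 + 1) + 1 by omega]
      simp only [dfsF, if_neg hfs, if_neg hfs1, ← hmd]
      congr 1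
      · exact dfsF_mono lst s md (by omega) ((md - s).toNat + 1) ((f - s).toNat - 1 + 1)
          (by omega) (by omega)
      · exact dfsF_mono lst (md + 1) f (by omega) ((f - (md + 1)).toNat + 1) ((f - s).toNat - 1 + 1)
          (by omega) (by omega)
termination_by (f - s).toNat
decreasing_by
  · omega
  · omega

-- ===== VERDICT (by name: the statement is the Claim_ definition above) =====
theorem dfs_spec : Claim_equal_dfs := by
  intro lst st fn _hdom hpre
  obtain ⟨hle, _⟩ := hpre
  show dfs lst st fn = dfs_alt lst st fn
  obtain ⟨k, hk, hrun⟩ := loopB_run lst st fn hle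
  unfold dfs dfs_alt
  have hfuel : 4 * (fn - st).toNat + 2 = k + (4 * (fn - st).toNat + 2 - k) := by omega
  rw [hfuel, hrun]
  cases h : 4 * (fn - st).toNat + 2 - k with
  | zero => omega
  | succ m => simp [loopB]
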